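-- pv_equiv track=rewrite | github.com/charan21104/bank-system-assgn | coding_problems/problem_3.py | find_minimum_loss
-- ===== SOURCE A (Python) =====
-- def find_minimum_loss(prices):
--     price_year_pairs = []
--     for i, p in enumerate(prices):
--         price_year_pairs.append((p, i))
--
--     price_year_pairs.sort()
--
--     min_loss = float('inf')
--     found_loss = False
--
--     for i in range(1, len(price_year_pairs)):
--         current_price, current_year = price_year_pairs[i]
--         prev_price, prev_year = price_year_pairs[i-1]
--
--         if current_year < prev_year:
--             found_loss = True
--             loss = current_price - prev_price
--             if loss < min_loss:
--                 min_loss = loss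
--
--     if found_loss:
--         return min_loss
--     else:
--         return None
-- ===== SOURCE B (Python) =====
-- def find_minimum_loss(prices):
--     best = None
--     n = len(prices)
--     for a in range(n):
--         for b in range(a + 1, n):
--             if prices[a] > prices[b]:
--                 loss = prices[a] - prices[b]
--                 if best is None or loss < best:
--                     best = loss
--     return best
-- ===== Notes on version B (the rewrite author's own statement) =====
-- stated objective: alternative
-- what changed: Replaced the sort-then-scan-adjacent-pairs-for-year-inversions algorithm with a direct brute-force minimum over all index pairs (a,b), a<b, with prices[a] > prices[b].
import Mathlib
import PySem

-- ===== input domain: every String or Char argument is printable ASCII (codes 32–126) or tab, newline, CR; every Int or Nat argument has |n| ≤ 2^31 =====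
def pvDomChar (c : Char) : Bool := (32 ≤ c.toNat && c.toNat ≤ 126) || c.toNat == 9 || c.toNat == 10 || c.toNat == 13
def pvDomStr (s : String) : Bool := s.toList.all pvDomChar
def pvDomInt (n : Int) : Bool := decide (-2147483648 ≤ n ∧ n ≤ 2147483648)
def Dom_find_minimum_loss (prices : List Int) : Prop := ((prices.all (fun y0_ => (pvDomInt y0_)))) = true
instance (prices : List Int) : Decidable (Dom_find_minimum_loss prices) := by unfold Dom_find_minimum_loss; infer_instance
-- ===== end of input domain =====

-- B replaces A's sort-then-adjacent-scan with a direct minimum over all index pairs (alternative algorithm, same return value).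

-- ===== PORT A =====
def find_minimum_loss (prices : List Int) : Option Int :=
  let pairs := (PySem.List.enumerate prices 0).foldl (fun acc q => acc ++ [(q.2, q.1)]) ([] : List (Int × Int))
  let sp := PySem.List.sorted2 pairs (fun pr => pr.1) (fun pr => pr.2) false
  (PySem.List.pyRange 1 (PySem.List.len sp) 1).foldl (fun st i =>
    let cur := PySem.List.pyGetD sp i ((0:Int), (0:Int))
    let prev := PySem.List.pyGetD sp (i-1) ((0:Int), (0:Int))
    if cur.2 < prev.2 then
      let loss := cur.1 - prev.1
      match st with
      | none => some loss
      | some m => if loss < m then some loss else some m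
    else st) none

-- ===== PORT B =====
def find_minimum_loss_alt (prices : List Int) : Option Int :=
  (PySem.List.pyRange 0 (PySem.List.len prices) 1).foldl (fun best a =>
    (PySem.List.pyRange (a+1) (PySem.List.len prices) 1).foldl (fun best b =>
      if PySem.List.pyGetD prices a 0 > PySem.List.pyGetD prices b 0 then
        let loss := PySem.List.pyGetD prices a 0 - PySem.List.pyGetD prices b 0
        match best with
        | none => some loss
        | some m => if loss < m then some loss else some m
      else best) best) none

-- ===== PRECONDITION & SPEC =====
def Spec_find_minimum_loss (prices : List Int) (out : Option Int) : Prop := out = find_minimum_loss_alt prices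
instance (prices : List Int) (out : Option Int) : Decidable (Spec_find_minimum_loss prices out) := by unfold Spec_find_minimum_loss; infer_instance

-- ===== CLAIM (what is proved, stated in full; the proofs are below) =====
def Claim_equal_find_minimum_loss : Prop := ∀ (prices : List Int), Dom_find_minimum_loss prices → Spec_find_minimum_loss prices (find_minimum_loss prices)

-- ===== LEMMAS AND PROOFS =====

def pvMinStep (st : Option Int) (l : Int) : Option Int :=
  match st with
  | none => some l
  | some m => if l < m then some l else some m

theorem pvMinStep_some (m l : Int) : pvMinStep (some m) l = some (min m l) := by
  simp only [pvMinStep]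
  split_ifs with h <;> simp [min_def] <;> omega

theorem foldl_pvMinStep_some (t : List Int) : ∀ m, t.foldl pvMinStep (some m) = some (t.foldl min m) := by
  induction t with
  | nil => intro m; rfl
  | cons x xs ih => intro m; simp only [List.foldl_cons, pvMinStep_some]; exact ih _

theorem foldl_pvMinStep_none (L : List Int) : L.foldl pvMinStep none = L.min? := by
  cases L with
  | nil => rfl
  | cons x xs => simp only [List.foldl_cons, List.min?_cons']; exact foldl_pvMinStep_some xs x

theorem foldl_if_filterMap {β : Type} (c : β → Prop) [DecidablePred c] (v : β → Int) :
    ∀ (L : List β) (st : Option Int),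
    L.foldl (fun st x => if c x then pvMinStep st (v x) else st) st
      = (L.filterMap (fun x => if c x then some (v x) else none)).foldl pvMinStep st := by
  intro L
  induction L with
  | nil => intro st; rfl
  | cons x xs ih =>
    intro st
    by_cases h : c x <;> simp [List.foldl_cons, h, ih]

def pvAdjPairs {α : Type} : List α → List (α × α)
  | a :: b :: t => (a, b) :: pvAdjPairs (b :: t)
  | _ => []

theorem mem_pvAdjPairs {α : Type} (L : List α) (pq : α × α) :
    pq ∈ pvAdjPairs L ↔ ∃ k, ∃ h : k + 1 < L.length, pq = (L[k], L[k + 1]) := by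
  induction L with
  | nil => simp [pvAdjPairs]
  | cons a t ih =>
    cases t with
    | nil => simp [pvAdjPairs]
    | cons b u =>
      simp only [pvAdjPairs, List.mem_cons, ih]
      constructor
      · rintro (rfl | ⟨k, hk, rfl⟩)
        · exact ⟨0, by simp, rfl⟩
        · exact ⟨k + 1, by simpa using hk, rfl⟩
      · rintro ⟨k, hk, rfl⟩
        cases k with
        | zero => left; rfl
        | succ k => right; exact ⟨k, by simpa using hk, rfl⟩



theorem foldl_range_adj {α σ : Type} (d : α) (g : σ → α → α → σ) :
    ∀ (L : List α) (st : σ),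
    (List.range (L.length - 1)).foldl (fun st k => g st (L.getD k d) (L.getD (k + 1) d)) st
      = (pvAdjPairs L).foldl (fun st pq => g st pq.1 pq.2) st := by
  intro L
  induction L with
  | nil => intro st; rfl
  | cons a t ih =>
    cases t with
    | nil => intro st; rfl
    | cons b u =>
      intro st
      have hlen : (a :: b :: u).length - 1 = ((b :: u).length - 1) + 1 := by simp
      rw [hlen, List.range_succ_eq_map, List.foldl_cons, List.foldl_map]
      refine Eq.trans (List.foldl_ext _
        (fun s k => g s ((b :: u).getD k d) ((b :: u).getD (k + 1) d)) _ ?_) ?_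
      · intro s k _
        simp
      · have h0 : (a :: b :: u).getD 0 d = a := by simp
        have h1 : (a :: b :: u).getD (0 + 1) d = b := by simp
        rw [h0, h1, ih (g st a b)]
        rfl

theorem foldl_pyRange_adj {α σ : Type} (d : α) (g : σ → α → α → σ) (L : List α) (st : σ) :
    (PySem.List.pyRange 1 (PySem.List.len L) 1).foldl
        (fun st i => g st (PySem.List.pyGetD L (i - 1) d) (PySem.List.pyGetD L i d)) st
      = (pvAdjPairs L).foldl (fun st pq => g st pq.1 pq.2) st := by
  rw [PySem.List.pyRange_one, List.foldl_map, ← foldl_range_adj d g L st]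
  have hn : (PySem.List.len L - 1).toNat = L.length - 1 := by
    simp [PySem.List.len]
  rw [hn]
  apply List.foldl_ext
  intro s k _
  have h1 : (1 : Int) + (k : Int) - 1 = ((k : Nat) : Int) := by omega
  have h2 : (1 : Int) + (k : Int) = (((k + 1 : Nat)) : Int) := by push_cast; omega
  rw [h1, h2, PySem.List.pyGetD_natCast, PySem.List.pyGetD_natCast]

theorem insertBy_pairwise {α : Type} (before : α → α → Bool)
    (hasym : ∀ a b, before a b = true → before b a = false)
    (htrans : ∀ a b c, before b a = false → before c b = false → before c a = false) :
    ∀ (ys : List α) (x : α), ys.Pairwise (fun a b => before b a = false) →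
      (PySem.List.insertBy before x ys).Pairwise (fun a b => before b a = false) := by
  intro ys
  induction ys with
  | nil => intro x _; simp [PySem.List.insertBy]
  | cons y t ih =>
    intro x h
    rw [List.pairwise_cons] at h
    obtain ⟨hy, ht⟩ := h
    show (PySem.List.insertBy before x (y :: t)).Pairwise _
    rw [PySem.List.insertBy]
    by_cases hxy : before x y = true
    · rw [if_pos hxy]
      refine List.Pairwise.cons ?_ (List.Pairwise.cons hy ht)
      intro z hz
      rcases List.mem_cons.mp hz with rfl | hzt
      · exact hasym _ _ hxy
      · exact htrans _ _ _ (hasym _ _ hxy) (hy z hzt)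
    · rw [if_neg hxy]
      refine List.Pairwise.cons ?_ (ih x ht)
      intro z hz
      rcases (PySem.List.mem_insertBy before x z t).mp hz with rfl | hzt
      · exact Bool.eq_false_iff.mpr hxy
      · exact hy z hzt

theorem foldl_insertBy_pairwise {α : Type} (before : α → α → Bool)
    (hasym : ∀ a b, before a b = true → before b a = false)
    (htrans : ∀ a b c, before b a = false → before c b = false → before c a = false)
    (xs : List α) :
    (xs.foldl (fun acc x => PySem.List.insertBy before x acc) []).Pairwise
      (fun a b => before b a = false) := by
  suffices h : ∀ (acc : List α), acc.Pairwise (fun a b => before b a = false) →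
      (xs.foldl (fun acc x => PySem.List.insertBy before x acc) acc).Pairwise
        (fun a b => before b a = false) from h [] (by simp)
  induction xs with
  | nil => intro acc h; simpa using h
  | cons x t ih =>
    intro acc h
    exact ih _ (insertBy_pairwise before hasym htrans acc x h)

-- lex order of Python tuple sort, on (Int × Int) pairs with identity component keys
theorem sorted2_pairwise_lexle (xs : List (Int × Int)) :
    (PySem.List.sorted2 xs (fun pr => pr.1) (fun pr => pr.2) false).Pairwise
      (fun a b => a.1 ≤ b.1 ∧ (a.1 < b.1 ∨ a.2 ≤ b.2)) := by
  have h := foldl_insertBy_pairwise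
    (fun a b : Int × Int => decide (a.1 < b.1) || (!decide (b.1 < a.1) && decide (a.2 < b.2)))
    (by intro a b hab; revert hab; simp; omega)
    (by intro a b c h1 h2; revert h1 h2; simp; omega)
    xs
  have he : PySem.List.sorted2 xs (fun pr => pr.1) (fun pr => pr.2) false
      = xs.foldl (fun acc x => PySem.List.insertBy
          (fun a b : Int × Int => decide (a.1 < b.1) || (!decide (b.1 < a.1) && decide (a.2 < b.2)))
          x acc) [] := rfl
  rw [he]
  refine h.imp ?_
  intro a b hab
  revert hab
  simp
  omega

theorem descent (L : List (Int × Int))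
    (hmono : ∀ (i j : Nat) (hi : i < L.length) (hj : j < L.length), i ≤ j → L[i].1 ≤ L[j].1)
    (hne : ∀ (i j : Nat) (hi : i < L.length) (hj : j < L.length), i < j → L[i].2 ≠ L[j].2) :
    ∀ (gap i j : Nat) (hi : i < L.length) (hj : j < L.length), j - i = gap → i < j →
      L[j].2 < L[i].2 →
      ∃ (k : Nat) (hk1 : k < L.length) (hk2 : k + 1 < L.length),
        L[k + 1].2 < L[k].2 ∧ L[k + 1].1 - L[k].1 ≤ L[j].1 - L[i].1 := by
  intro gap
  induction gap using Nat.strong_induction_on with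
  | _ gap IH =>
    intro i j hi hj hgap hij hinv
    by_cases hadj : j = i + 1
    · subst hadj
      exact ⟨i, hi, hj, hinv, le_refl _⟩
    · have hm : i + 1 < j := by omega
      have hm1 : i + 1 < L.length := by omega
      rcases lt_trichotomy (L[i + 1]'hm1).2 (L[i]'hi).2 with hlt | heq | hgt
      · refine ⟨i, hi, hm1, hlt, ?_⟩
        have h := hmono (i + 1) j hm1 hj (by omega)
        omega
      · exact absurd heq.symm (hne i (i + 1) hi hm1 (by omega))
      · have hinv' : (L[j]'hj).2 < (L[i + 1]'hm1).2 := by omega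
        obtain ⟨k, hk1, hk2, h1, h2⟩ :=
          IH (j - (i + 1)) (by omega) (i + 1) j hm1 hj rfl hm hinv'
        refine ⟨k, hk1, hk2, h1, ?_⟩
        have h := hmono i (i + 1) hi hm1 (by omega)
        omega

theorem min?_eq_of_dominate (L₁ L₂ : List Int)
    (h1 : ∀ x ∈ L₁, x ∈ L₂) (h2 : ∀ y ∈ L₂, ∃ x ∈ L₁, x ≤ y) :
    L₁.min? = L₂.min? := by
  cases hL2 : L₂ with
  | nil =>
    subst hL2
    cases hL1 : L₁ with
    | nil => rfl
    | cons x t => exact absurd (h1 x (by simp [hL1])) (by simp)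
  | cons y t =>
    cases hL1 : L₁ with
    | nil =>
      obtain ⟨x, hx, _⟩ := h2 y (by simp [hL2])
      simp [hL1] at hx
    | cons a s =>
      rw [← hL1, ← hL2]
      obtain ⟨m1, hm1⟩ : ∃ m, L₁.min? = some m := by
        rw [hL1]; exact ⟨_, List.min?_cons'⟩
      obtain ⟨m2, hm2⟩ : ∃ m, L₂.min? = some m := by
        rw [hL2]; exact ⟨_, List.min?_cons'⟩
      rw [hm1, hm2]
      rw [List.min?_eq_some_iff] at hm1 hm2
      obtain ⟨hmem1, hle1⟩ := hm1
      obtain ⟨hmem2, hle2⟩ := hm2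
      obtain ⟨x, hx, hxle⟩ := h2 m2 hmem2
      have hba : m2 ≤ m1 := hle2 m1 (h1 m1 hmem1)
      have hax : m1 ≤ x := hle1 x hx
      simp only [Option.some.injEq]
      omega

-- the sorted pair list of port A
def pvSP (prices : List Int) : List (Int × Int) :=
  PySem.List.sorted2
    ((PySem.List.enumerate prices 0).foldl (fun acc q => acc ++ [(q.2, q.1)]) ([] : List (Int × Int)))
    (fun pr => pr.1) (fun pr => pr.2) false

def pvLA (prices : List Int) : List Int :=
  (pvAdjPairs (pvSP prices)).filterMap
    (fun pq => if pq.2.2 < pq.1.2 then some (pq.2.1 - pq.1.1) else none)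

def pvLB (prices : List Int) : List Int :=
  (PySem.List.pyRange 0 (PySem.List.len prices) 1).flatMap (fun a =>
    (PySem.List.pyRange (a+1) (PySem.List.len prices) 1).filterMap (fun b =>
      if PySem.List.pyGetD prices a 0 > PySem.List.pyGetD prices b 0 then
        some (PySem.List.pyGetD prices a 0 - PySem.List.pyGetD prices b 0) else none))

theorem portA_eq_minLA (prices : List Int) : find_minimum_loss prices = (pvLA prices).min? := by
  have h1 : find_minimum_loss prices
      = (PySem.List.pyRange 1 (PySem.List.len (pvSP prices)) 1).foldl (fun st i =>
          (fun st (u v : Int × Int) => if v.2 < u.2 then pvMinStep st (v.1 - u.1) else st)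
            st (PySem.List.pyGetD (pvSP prices) (i-1) ((0:Int),(0:Int)))
            (PySem.List.pyGetD (pvSP prices) i ((0:Int),(0:Int)))) none := rfl
  rw [h1, foldl_pyRange_adj ((0:Int),(0:Int))
    (fun st (u v : Int × Int) => if v.2 < u.2 then pvMinStep st (v.1 - u.1) else st)
    (pvSP prices) none]
  have h2 : ((pvAdjPairs (pvSP prices)).foldl (fun st pq =>
      if pq.2.2 < pq.1.2 then pvMinStep st (pq.2.1 - pq.1.1) else st) none)
      = (pvLA prices).foldl pvMinStep none :=
    foldl_if_filterMap (fun pq : (Int×Int)×(Int×Int) => pq.2.2 < pq.1.2)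
      (fun pq => pq.2.1 - pq.1.1) _ none
  rw [← foldl_pvMinStep_none]
  exact h2

theorem portB_eq_minLB (prices : List Int) : find_minimum_loss_alt prices = (pvLB prices).min? := by
  have h1 : find_minimum_loss_alt prices
      = (PySem.List.pyRange 0 (PySem.List.len prices) 1).foldl (fun best a =>
          (PySem.List.pyRange (a+1) (PySem.List.len prices) 1).foldl (fun best b =>
            if PySem.List.pyGetD prices a 0 > PySem.List.pyGetD prices b 0 then
              pvMinStep best (PySem.List.pyGetD prices a 0 - PySem.List.pyGetD prices b 0)
            else best) best) none := rfl
  rw [h1, ← foldl_pvMinStep_none]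
  unfold pvLB
  rw [List.foldl_flatMap]
  apply List.foldl_ext
  intro st a _
  exact foldl_if_filterMap
    (fun b => PySem.List.pyGetD prices a 0 > PySem.List.pyGetD prices b 0)
    (fun b => PySem.List.pyGetD prices a 0 - PySem.List.pyGetD prices b 0) _ st

theorem mem_pvLA (prices : List Int) (x : Int) :
    x ∈ pvLA prices ↔ ∃ (k : Nat) (hk1 : k < (pvSP prices).length) (hk2 : k + 1 < (pvSP prices).length),
      (pvSP prices)[k + 1].2 < (pvSP prices)[k].2 ∧ x = (pvSP prices)[k + 1].1 - (pvSP prices)[k].1 := by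
  unfold pvLA
  rw [List.mem_filterMap]
  constructor
  · rintro ⟨pq, hpq, hx⟩
    obtain ⟨k, hk2, rfl⟩ := (mem_pvAdjPairs _ pq).mp hpq
    split_ifs at hx with hc
    · exact ⟨k, by omega, hk2, hc, by simpa using hx.symm⟩
  · rintro ⟨k, hk1, hk2, hc, rfl⟩
    refine ⟨((pvSP prices)[k], (pvSP prices)[k + 1]), (mem_pvAdjPairs _ _).mpr ⟨k, hk2, rfl⟩, ?_⟩
    simp [hc]

theorem mem_pvLB (prices : List Int) (x : Int) :
    x ∈ pvLB prices ↔ ∃ (a b : Nat) (ha : a < prices.length) (hb : b < prices.length),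
      a < b ∧ prices[b] < prices[a] ∧ x = prices[a] - prices[b] := by
  unfold pvLB
  rw [List.mem_flatMap]
  constructor
  · rintro ⟨a, ha, hx⟩
    rw [List.mem_filterMap] at hx
    obtain ⟨b, hb, hx⟩ := hx
    rw [PySem.List.mem_pyRange_one] at ha hb
    simp only [PySem.List.len] at ha hb
    split_ifs at hx with hc
    · have hA : a = ((a.toNat : Nat) : Int) := by omega
      have hB : b = ((b.toNat : Nat) : Int) := by omega
      rw [hA, hB, PySem.List.pyGetD_natCast, PySem.List.pyGetD_natCast,
        List.getD_eq_getElem _ _ (by omega), List.getD_eq_getElem _ _ (by omega)] at hx hc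
      refine ⟨a.toNat, b.toNat, by omega, by omega, by omega, hc, by simpa using hx.symm⟩
  · rintro ⟨a, b, ha, hb, hab, hc, rfl⟩
    refine ⟨(a : Int), ?_, ?_⟩
    · rw [PySem.List.mem_pyRange_one]; simp [PySem.List.len]; omega
    · rw [List.mem_filterMap]
      refine ⟨(b : Int), ?_, ?_⟩
      · rw [PySem.List.mem_pyRange_one]; simp [PySem.List.len]; omega
      · rw [PySem.List.pyGetD_natCast, PySem.List.pyGetD_natCast,
          List.getD_eq_getElem _ _ (by omega), List.getD_eq_getElem _ _ (by omega)]
        simp [hc]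

theorem pvSP_perm (prices : List Int) :
    (pvSP prices).Perm ((PySem.List.enumerate prices 0).map (fun q => (q.2, q.1))) := by
  unfold pvSP
  rw [PySem.List.foldl_append_singleton_eq_map (fun q : Int × Int => (q.2, q.1))
    (PySem.List.enumerate prices 0) []]
  exact PySem.List.sorted2_perm _ _ _ _

theorem mem_pvSP (prices : List Int) (u : Int × Int) :
    u ∈ pvSP prices ↔ ∃ (i : Nat) (hi : i < prices.length), u = (prices[i], (i : Int)) := by
  rw [(pvSP_perm prices).mem_iff, List.mem_map]
  constructor
  · rintro ⟨q, hq, rfl⟩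
    obtain ⟨k, hk, rfl⟩ := (PySem.List.mem_enumerate_iff _ _ _).mp hq
    exact ⟨k, hk, by simp⟩
  · rintro ⟨i, hi, rfl⟩
    exact ⟨((i : Int), prices[i]), (PySem.List.mem_enumerate_iff _ _ _).mpr ⟨i, hi, by simp⟩, rfl⟩

theorem pvSP_lexle (prices : List Int) :
    (pvSP prices).Pairwise (fun a b => a.1 ≤ b.1 ∧ (a.1 < b.1 ∨ a.2 ≤ b.2)) :=
  sorted2_pairwise_lexle _

theorem pvSP_snd_nodup (prices : List Int) :
    (pvSP prices).Pairwise (fun a b => a.2 ≠ b.2) := by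
  have hperm := (pvSP_perm prices).map (fun u : Int × Int => u.2)
  have hmap : ((PySem.List.enumerate prices 0).map (fun q : Int × Int => (q.2, q.1))).map
      (fun u : Int × Int => u.2) = (PySem.List.enumerate prices 0).map (fun q => q.1) := by
    simp
  have hnd : (((pvSP prices)).map (fun u : Int × Int => u.2)).Nodup := by
    rw [hperm.nodup_iff, hmap, PySem.List.map_fst_enumerate]
    exact PySem.List.nodup_pyRange_one _ _
  rw [List.Nodup, List.pairwise_map] at hnd
  exact hnd

theorem pvSP_mono (prices : List Int) :
    ∀ (i j : Nat) (hi : i < (pvSP prices).length) (hj : j < (pvSP prices).length),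
      i ≤ j → (pvSP prices)[i].1 ≤ (pvSP prices)[j].1 := by
  intro i j hi hj hij
  rcases Nat.lt_or_ge i j with h | h
  · exact ((List.pairwise_iff_getElem.mp (pvSP_lexle prices)) i j hi hj h).1
  · have : i = j := by omega
    subst this; rfl

theorem pvSP_ne (prices : List Int) :
    ∀ (i j : Nat) (hi : i < (pvSP prices).length) (hj : j < (pvSP prices).length),
      i < j → (pvSP prices)[i].2 ≠ (pvSP prices)[j].2 :=
  fun i j hi hj h => (List.pairwise_iff_getElem.mp (pvSP_snd_nodup prices)) i j hi hj h

theorem pvLA_subset_pvLB (prices : List Int) : ∀ x ∈ pvLA prices, x ∈ pvLB prices := by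
  intro x hx
  obtain ⟨k, hk1, hk2, hinv, rfl⟩ := (mem_pvLA prices x).mp hx
  obtain ⟨i1, hi1, he1⟩ := (mem_pvSP prices _).mp (List.getElem_mem hk1)
  obtain ⟨i2, hi2, he2⟩ := (mem_pvSP prices _).mp (List.getElem_mem hk2)
  have hlex := (List.pairwise_iff_getElem.mp (pvSP_lexle prices)) k (k + 1) hk1 hk2 (by omega)
  rw [mem_pvLB]
  have hab : i2 < i1 := by
    have h := hinv
    rw [he1, he2] at h
    simp only [] at h
    exact_mod_cast h
  have hpr : prices[i1] < prices[i2] := by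
    rcases hlex.2 with h | h
    · rw [he1, he2] at h; exact h
    · rw [he1, he2] at h hinv; simp only [] at h hinv; omega
  exact ⟨i2, i1, hi2, hi1, hab, hpr, by rw [he1, he2]⟩

theorem pvLB_dominated (prices : List Int) : ∀ y ∈ pvLB prices, ∃ x ∈ pvLA prices, x ≤ y := by
  intro y hy
  obtain ⟨a, b, ha, hb, hab, hc, rfl⟩ := (mem_pvLB prices y).mp hy
  obtain ⟨i, hi, hei⟩ := List.mem_iff_getElem.mp ((mem_pvSP prices _).mpr ⟨b, hb, rfl⟩)
  obtain ⟨j, hj, hej⟩ := List.mem_iff_getElem.mp ((mem_pvSP prices _).mpr ⟨a, ha, rfl⟩)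
  have hij : i < j := by
    rcases Nat.lt_trichotomy i j with h | h | h
    · exact h
    · exfalso
      subst h
      rw [hei] at hej
      have h2 : ((b : Int)) = (a : Int) := congrArg Prod.snd hej
      omega
    · exfalso
      have := pvSP_mono prices j i hj hi (by omega)
      rw [hei, hej] at this
      simp at this
      omega
  have hinv : (pvSP prices)[j].2 < (pvSP prices)[i].2 := by
    rw [hei, hej]
    show (a : Int) < (b : Int)
    exact_mod_cast hab
  obtain ⟨k, hk1, hk2, hkinv, hkle⟩ :=
    descent (pvSP prices) (pvSP_mono prices) (pvSP_ne prices) (j - i) i j hi hj rfl hij hinv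
  refine ⟨(pvSP prices)[k + 1].1 - (pvSP prices)[k].1,
    (mem_pvLA prices _).mpr ⟨k, hk1, hk2, hkinv, rfl⟩, ?_⟩
  rw [hei, hej] at hkle
  simpa using hkle

theorem ports_agree (prices : List Int) : find_minimum_loss prices = find_minimum_loss_alt prices := by
  rw [portA_eq_minLA, portB_eq_minLB]
  exact min?_eq_of_dominate _ _ (pvLA_subset_pvLB prices) (pvLB_dominated prices)

-- ===== VERDICT (by name: the statement is the Claim_ definition above) =====
theorem find_minimum_loss_spec : Claim_equal_find_minimum_loss := by
  intro prices _
  unfold Spec_find_minimum_loss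
  exact ports_agree prices
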